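-- pv_equiv track=rewrite | github.com/danielbrovarnik/StockleBot | main.py | generate_wordle_feedback
-- ===== SOURCE A (Python) =====
-- def generate_wordle_feedback(guess: str, answer: str) -> str:
--     """Generates Wordle-style feedback (🟩🟨⬛) for a guess."""
--     if len(guess) != len(answer): return ""
--     feedback = ["⬛"] * len(answer)
--     answer_letters = list(answer)
--     # First pass for correct letters in the correct position (green)
--     for i in range(len(guess)):
--         if guess[i] == answer[i]:
--             feedback[i] = "🟩"
--             answer_letters[i] = None # Mark as used
--     # Second pass for correct letters in the wrong position (yellow)
--     for i in range(len(guess)):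
--         if feedback[i] == "🟩": continue
--         if guess[i] in answer_letters:
--             feedback[i] = "🟨"
--             answer_letters[answer_letters.index(guess[i])] = None # Mark as used
--     return "".join(feedback)
-- ===== SOURCE B (Python) =====
-- def generate_wordle_feedback(guess: str, answer: str) -> str:
--     """Stateless per-position characterization of Wordle feedback: no feedback
--     array is mutated and no answer letters are consumed; instead each cell is
--     computed independently by a closed rule -- a non-green guess letter is
--     yellow iff its rank among non-green occurrences of that letter so far is
--     below the letter's non-green count in the answer."""
--     if len(guess) != len(answer):
--         return ""
--     n = len(answer)
--
--     def cell(i):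
--         g = guess[i]
--         if g == answer[i]:
--             return "🟩"
--         quota = sum(1 for j in range(n) if answer[j] == g and guess[j] != answer[j])
--         rank = sum(1 for j in range(i) if guess[j] == g and guess[j] != answer[j])
--         return "🟨" if rank < quota else "⬛"
--
--     return "".join(cell(i) for i in range(n))
-- ===== Notes on version B (the rewrite author's own statement) =====
-- stated objective: alternative
-- what changed: Replaced A's stateful two-pass marking (mutating a feedback array and consuming answer letters via 'in'/list.index) with a stateless per-position closed rule: each cell is computed independently, yellow iff the letter's rank among earlier non-green occurrences in the guess is below its non-green count in the answer.
import Mathlib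
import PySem

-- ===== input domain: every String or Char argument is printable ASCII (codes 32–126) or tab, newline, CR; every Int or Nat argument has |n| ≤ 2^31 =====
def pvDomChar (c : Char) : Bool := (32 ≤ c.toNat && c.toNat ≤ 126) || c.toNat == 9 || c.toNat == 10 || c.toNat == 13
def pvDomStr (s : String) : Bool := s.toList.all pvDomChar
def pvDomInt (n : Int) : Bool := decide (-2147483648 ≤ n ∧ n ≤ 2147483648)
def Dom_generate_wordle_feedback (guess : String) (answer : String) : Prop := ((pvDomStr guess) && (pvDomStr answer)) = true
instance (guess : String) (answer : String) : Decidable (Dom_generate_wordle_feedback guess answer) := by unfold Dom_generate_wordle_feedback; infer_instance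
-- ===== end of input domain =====

-- B replaces A's stateful two-pass marking/consumption with a stateless per-position
-- closed rule (rank among non-green occurrences vs non-green count in the answer).

-- ===== PORT A =====
-- step of A's first pass (green marking) over i in range(len(guess))
def pvA_step1 (g a : List Char) (st : List Char × List (Option Char)) (i : Nat) :
    List Char × List (Option Char) :=
  if g.getD i ' ' = a.getD i ' ' then (st.1.set i '🟩', st.2.set i none) else st

-- step of A's second pass (yellow marking)
def pvA_step2 (g : List Char) (st : List Char × List (Option Char)) (i : Nat) :
    List Char × List (Option Char) :=
  if st.1.getD i ' ' = '🟩' then st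
  else if some (g.getD i ' ') ∈ st.2 then
    (st.1.set i '🟨',
     match PySem.List.index? st.2 (some (g.getD i ' ')) with
     | some j => st.2.set j none
     | none => st.2)
  else st

def generate_wordle_feedback (guess : String) (answer : String) : String :=
  let g := guess.toList
  let a := answer.toList
  if g.length ≠ a.length then ""
  else
    let st1 := (List.range g.length).foldl (pvA_step1 g a)
                 (List.replicate a.length '⬛', a.map some)
    let st2 := (List.range g.length).foldl (pvA_step2 g) st1
    String.mk st2.1

-- ===== PORT B =====
-- the per-position cell rule of Source B: 'sum(1 for j in range(..) if P)' is ported as countP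
def pvB_cell (g a : List Char) (i : Nat) : Char :=
  let gc := g.getD i ' '
  if gc = a.getD i ' ' then '🟩'
  else
    let quota := (List.range a.length).countP
      (fun j => (a.getD j ' ' == gc) && !(g.getD j ' ' == a.getD j ' '))
    let rank := (List.range i).countP
      (fun j => (g.getD j ' ' == gc) && !(g.getD j ' ' == a.getD j ' '))
    if rank < quota then '🟨' else '⬛'

def generate_wordle_feedback_alt (guess : String) (answer : String) : String :=
  let g := guess.toList
  let a := answer.toList
  if g.length ≠ a.length then ""
  else String.mk ((List.range a.length).map (pvB_cell g a))

-- ===== PRECONDITION & SPEC =====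
def Spec_generate_wordle_feedback (guess : String) (answer : String) (out : String) : Prop := out = generate_wordle_feedback_alt guess answer
instance (guess : String) (answer : String) (out : String) : Decidable (Spec_generate_wordle_feedback guess answer out) := by unfold Spec_generate_wordle_feedback; infer_instance

-- ===== CLAIM (what is proved, stated in full; the proofs are below) =====
def Claim_equal_generate_wordle_feedback : Prop := ∀ (guess : String) (answer : String), Dom_generate_wordle_feedback guess answer → Spec_generate_wordle_feedback guess answer (generate_wordle_feedback guess answer)

-- ===== LEMMAS AND PROOFS =====

-- f1/f2: per-position result of A's first pass
def pvF1 (p : Char × Char) : Char := if p.1 = p.2 then '🟩' else '⬛'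
def pvF2 (p : Char × Char) : Option Char := if p.1 = p.2 then none else some p.2

-- rank of position k for letter c (non-green occurrences of c in the guess prefix)
def pvRank (g a : List Char) (k : Nat) (c : Char) : Nat :=
  (List.range k).countP (fun j => (g.getD j ' ' == c) && !(g.getD j ' ' == a.getD j ' '))

-- quota of letter c (non-green occurrences of c in the answer)
def pvQuota (g a : List Char) (c : Char) : Nat :=
  (List.range a.length).countP (fun j => (a.getD j ' ' == c) && !(g.getD j ' ' == a.getD j ' '))

lemma pv_set_len_append {α : Type} (l r : List α) (v : α) :
    (l ++ r).set l.length v = l ++ r.set 0 v := by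
  induction l with
  | nil => simp
  | cons x xs ih => simp [ih]

lemma pv_getD_len_append {α : Type} (l : List α) (x : α) (r : List α) (d : α) :
    (l ++ x :: r).getD l.length d = x := by
  induction l with
  | nil => simp
  | cons y ys ih => simpa using ih

lemma pv_getD_append {α : Type} (l : List α) (x : α) (r : List α) (d : α) (n : Nat)
    (h : l.length = n) : (l ++ x :: r).getD n d = x := by
  subst h; exact pv_getD_len_append l x r d

lemma pv_set_append {α : Type} (l r : List α) (v : α) (n : Nat) (h : l.length = n) :
    (l ++ r).set n v = l ++ r.set 0 v := by
  subst h; exact pv_set_len_append l r v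

-- pass-1 characterization
lemma pv_pass1 (g a : List Char) (h : g.length = a.length) (k : Nat) (hk : k ≤ a.length) :
    (List.range k).foldl (pvA_step1 g a) (List.replicate a.length '⬛', a.map some)
      = (((g.zip a).take k).map pvF1 ++ List.replicate (a.length - k) '⬛',
         ((g.zip a).take k).map pvF2 ++ (a.drop k).map some) := by
  induction k with
  | zero => simp
  | succ k ih =>
    have hk' : k ≤ a.length := by omega
    have hka : k < a.length := by omega
    have hkg : k < g.length := by omega
    have hkz : k < (g.zip a).length := by simp [List.length_zip]; omega
    rw [List.range_succ, List.foldl_append, ih hk', List.foldl_cons, List.foldl_nil]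
    rw [List.take_succ_eq_append_getElem hkz, List.getElem_zip]
    have hg : g.getD k ' ' = g[k] := List.getD_eq_getElem g ' ' hkg
    have ha : a.getD k ' ' = a[k] := List.getD_eq_getElem a ' ' hka
    have hlen1 : (((g.zip a).take k).map pvF1).length = k := by
      simp [List.length_take, List.length_zip]; omega
    have hlen2 : (((g.zip a).take k).map pvF2).length = k := by
      simp [List.length_take, List.length_zip]; omega
    have hrep : a.length - k = (a.length - (k + 1)) + 1 := by omega
    have hdrop : a.drop k = a[k] :: a.drop (k + 1) := List.drop_eq_getElem_cons hka
    unfold pvA_step1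
    rw [hg, ha]
    by_cases hgc : g[k] = a[k]
    · rw [if_pos hgc]
      simp only [hrep, List.replicate_succ, hdrop, List.map_cons, List.map_append, pvF1, pvF2,
        hgc, if_pos rfl]
      have e1 := pv_set_len_append (List.map pvF1 (List.take k (g.zip a)))
        ('⬛' :: List.replicate (a.length - (k + 1)) '⬛') '🟩'
      rw [hlen1] at e1
      have e2 := pv_set_len_append (List.map pvF2 (List.take k (g.zip a)))
        (some a[k] :: List.map some (List.drop (k + 1) a)) none
      rw [hlen2] at e2
      rw [Prod.mk.injEq]
      exact ⟨by rw [e1]; simp, by rw [e2]; simp⟩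
    · rw [if_neg hgc]
      simp only [hrep, List.replicate_succ, hdrop, List.map_cons, List.map_append, pvF1, pvF2,
        if_neg hgc]
      simp

-- countP over a list = countP of the positional predicate over range
lemma pv_countP_range {α : Type} (l : List α) (d : α) (p : α → Bool) :
    (List.range l.length).countP (fun j => p (l.getD j d)) = l.countP p := by
  have hmap : (List.range l.length).map (fun j => l.getD j d) = l := by
    apply List.ext_getElem
    · simp
    · intro i h1 h2
      simp [List.getElem?_eq_getElem h2]
  conv_rhs => rw [← hmap]
  rw [List.countP_map]
  rfl

-- base bridge: count of (some c) in pass-1's residue list = quota of c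
lemma pv_count_quota (g a : List Char) (h : g.length = a.length) (c : Char) :
    ((g.zip a).map pvF2).count (some c) = pvQuota g a c := by
  have hlen : (g.zip a).length = a.length := by simp [List.length_zip, h]
  unfold pvQuota
  rw [List.count_eq_countP, List.countP_map,
    ← pv_countP_range (g.zip a) (' ', ' '), hlen]
  apply List.countP_congr
  intro j hj
  have hja : j < a.length := by simpa using hj
  have hjg : j < g.length := by omega
  have hjn : j < (g.zip a).length := by omega
  have hz : (g.zip a).getD j (' ', ' ') = (g[j], a[j]) := by
    rw [List.getD_eq_getElem _ _ hjn, List.getElem_zip]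
  simp only [Function.comp, hz, pvF2,
    List.getD_eq_getElem g ' ' hjg, List.getD_eq_getElem a ' ' hja]
  by_cases hgj : g[j] = a[j] <;> by_cases hca : a[j] = c <;>
    simp [hgj, hca] <;> simp_all

lemma pv_rank_succ (g a : List Char) (k : Nat) (c : Char) :
    pvRank g a (k + 1) c
      = pvRank g a k c
        + (if (g.getD k ' ' == c) && !(g.getD k ' ' == a.getD k ' ') then 1 else 0) := by
  unfold pvRank
  rw [List.range_succ, List.countP_append]
  simp [List.countP_cons]

-- main pass-2 invariant: output prefix follows B's cell rule; residue counts track quota − rank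
lemma pv_pass2 (g a : List Char) (h : g.length = a.length) (k : Nat) (hk : k ≤ a.length) :
    ((List.range k).foldl (pvA_step2 g) ((g.zip a).map pvF1, (g.zip a).map pvF2)).1
        = (List.range k).map (pvB_cell g a) ++ (((g.zip a).drop k).map pvF1)
    ∧ ∀ c : Char,
        (((List.range k).foldl (pvA_step2 g) ((g.zip a).map pvF1, (g.zip a).map pvF2)).2).count
            (some c)
          = pvQuota g a c - min (pvRank g a k c) (pvQuota g a c) := by
  induction k with
  | zero =>
    refine ⟨by simp, ?_⟩
    intro c
    simp [pvRank, pv_count_quota g a h c]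
  | succ k ih =>
    have hk' : k ≤ a.length := by omega
    have hka : k < a.length := by omega
    have hkg : k < g.length := by omega
    have hkz : k < (g.zip a).length := by simp [List.length_zip]; omega
    obtain ⟨ih1, ih2⟩ := ih hk'
    rw [List.range_succ, List.foldl_append, List.foldl_cons, List.foldl_nil]
    set SA := (List.range k).foldl (pvA_step2 g) ((g.zip a).map pvF1, (g.zip a).map pvF2) with hSA
    have hzk : (g.zip a)[k] = (g[k], a[k]) := List.getElem_zip
    have hdropk : (g.zip a).drop k = (g[k], a[k]) :: (g.zip a).drop (k + 1) := by
      rw [List.drop_eq_getElem_cons hkz, hzk]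
    have hgd : g.getD k ' ' = g[k] := List.getD_eq_getElem g ' ' hkg
    have had : a.getD k ' ' = a[k] := List.getD_eq_getElem a ' ' hka
    have hmaplen : ((List.range k).map (pvB_cell g a)).length = k := by simp
    have hfb : SA.1.getD k ' ' = pvF1 (g[k], a[k]) := by
      rw [ih1, hdropk, List.map_cons]
      exact pv_getD_append _ _ _ _ _ hmaplen
    have hcellk : pvB_cell g a k
        = if g[k] = a[k] then '🟩'
          else if pvRank g a k g[k] < pvQuota g a g[k] then '🟨' else '⬛' := by
      unfold pvB_cell pvQuota pvRank
      rw [hgd, had]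
    have hrangemap : (List.range k ++ [k]).map (pvB_cell g a)
        = (List.range k).map (pvB_cell g a) ++ [pvB_cell g a k] := by
      simp
    unfold pvA_step2
    rw [hgd, hfb]
    by_cases hgc : g[k] = a[k]
    · have hf1 : pvF1 (g[k], a[k]) = '🟩' := by simp [pvF1, hgc]
      rw [hf1, if_pos rfl]
      refine ⟨?_, ?_⟩
      · rw [ih1, hdropk, List.map_cons, hf1, hrangemap, hcellk, if_pos hgc]
        simp
      · intro c
        rw [ih2 c, pv_rank_succ, hgd, had]
        simp [hgc]
    · have hf1 : pvF1 (g[k], a[k]) = '⬛' := by simp [pvF1, hgc]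
      rw [hf1, if_neg (by decide)]
      by_cases hmem : some g[k] ∈ SA.2
      · have hcnt : 0 < SA.2.count (some g[k]) := List.count_pos_iff.mpr hmem
        have hrk : pvRank g a k g[k] < pvQuota g a g[k] := by
          have := ih2 g[k]; omega
        rw [if_pos hmem]
        obtain ⟨j, hj⟩ := Option.isSome_iff_exists.mp
          ((PySem.List.index?_isSome_iff SA.2 (some g[k])).mpr hmem)
        obtain ⟨pre, suf, hdec, hjlen, hpre⟩ :=
          (PySem.List.index?_eq_some_iff SA.2 (some g[k]) j).mp hj
        rw [hj]
        refine ⟨?_, ?_⟩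
        · dsimp only
          rw [ih1, hdropk, List.map_cons, hf1,
            pv_set_append _ _ _ _ hmaplen, List.set_cons_zero, hrangemap, hcellk,
            if_neg hgc, if_pos hrk]
          simp
        · intro c
          dsimp only
          rw [hdec, pv_set_append _ _ _ _ hjlen, List.set_cons_zero]
          have holdc := ih2 c
          rw [hdec] at holdc
          have hcp : List.count (some g[k]) pre = 0 := List.count_eq_zero.mpr hpre
          by_cases hc : g[k] = c
          · subst hc
            have hstep : pvRank g a (k + 1) g[k] = pvRank g a k g[k] + 1 := by
              rw [pv_rank_succ, hgd, had]; simp [hgc]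
            have hnew : List.count (some g[k]) (pre ++ (none : Option Char) :: suf)
                = List.count (some g[k]) suf := by
              simp [List.count_append, List.count_cons, hcp]
            have hold2 : List.count (some g[k]) suf + 1
                = pvQuota g a g[k] - min (pvRank g a k g[k]) (pvQuota g a g[k]) := by
              rw [← holdc]; simp [List.count_append, List.count_cons, hcp]
            rw [hnew, hstep]
            omega
          · have hstep : pvRank g a (k + 1) c = pvRank g a k c := by
              rw [pv_rank_succ, hgd, had]; simp [hc]
            have hnew : List.count (some c) (pre ++ (none : Option Char) :: suf)
                = List.count (some c) (pre ++ some g[k] :: suf) := by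
              simp [List.count_append, List.count_cons, hc]
            rw [hnew, hstep, holdc]
      · have hcnt : SA.2.count (some g[k]) = 0 := by
          rcases Nat.eq_zero_or_pos (SA.2.count (some g[k])) with h0 | hp
          · exact h0
          · exact absurd (List.count_pos_iff.mp hp) hmem
        have hrk : ¬ pvRank g a k g[k] < pvQuota g a g[k] := by
          have := ih2 g[k]; omega
        rw [if_neg hmem]
        refine ⟨?_, ?_⟩
        · rw [ih1, hdropk, List.map_cons, hf1, hrangemap, hcellk, if_neg hgc, if_neg hrk]
          simp
        · intro c
          rw [ih2 c]
          by_cases hc : g[k] = c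
          · subst hc
            have hstep : pvRank g a (k + 1) g[k] = pvRank g a k g[k] + 1 := by
              rw [pv_rank_succ, hgd, had]; simp [hgc]
            rw [hstep]
            omega
          · have hstep : pvRank g a (k + 1) c = pvRank g a k c := by
              rw [pv_rank_succ, hgd, had]; simp [hc]
            rw [hstep]

-- ===== VERDICT (by name: the statement is the Claim_ definition above) =====
theorem generate_wordle_feedback_spec : Claim_equal_generate_wordle_feedback := by
  intro guess answer _
  unfold Spec_generate_wordle_feedback generate_wordle_feedback generate_wordle_feedback_alt
  by_cases h : guess.toList.length = answer.toList.length
  · rw [if_neg (not_not_intro h), if_neg (not_not_intro h)]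
    have hzlen : (guess.toList.zip answer.toList).length = answer.toList.length := by
      simp [List.length_zip, h]
    have h1 := pv_pass1 guess.toList answer.toList h answer.toList.length le_rfl
    have h2 := (pv_pass2 guess.toList answer.toList h answer.toList.length le_rfl).1
    rw [List.take_of_length_le (le_of_eq hzlen)] at h1
    rw [← hzlen, List.drop_length, List.map_nil, List.append_nil, hzlen] at h2
    simp only [Nat.sub_self, List.replicate_zero, List.append_nil, List.drop_length,
      List.map_nil] at h1
    rw [h]
    dsimp only
    rw [h1, h2]
  · rw [if_pos h, if_pos h]
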